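-- pv_equiv track=rewrite | github.com/drmisssciurus/bp-tr | lesson9_while/test2.py | print_stars
-- ===== SOURCE A (Python) =====
-- def print_stars(stars:int, column:int)->str:
-- 	counter = 0
-- 	result = ''
-- 	if column <= 0 or stars <= 0:
-- 		result = 'Please input number > 0'
-- 		return result
-- 	while counter < stars:
-- 		result += "*"
-- 		counter += 1
-- 		if counter % column == 0:
-- 			result += "\n"
-- 	return result
-- ===== SOURCE B (Python) =====
-- def print_stars(stars: int, column: int) -> str:
--     if column <= 0 or stars <= 0:
--         return 'Please input number > 0'
--     full = stars // column
--     rem = stars % column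
--     # min keeps the row no longer than the output itself (column may hugely exceed stars)
--     return ('*' * min(column, stars) + '\n') * full + '*' * rem
-- ===== Notes on version B (the rewrite author's own statement) =====
-- stated objective: faster
-- what changed: Replaces the per-star loop with counter/modulo bookkeeping by a closed-form chunked construction using divmod and string repetition.
import Mathlib
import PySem

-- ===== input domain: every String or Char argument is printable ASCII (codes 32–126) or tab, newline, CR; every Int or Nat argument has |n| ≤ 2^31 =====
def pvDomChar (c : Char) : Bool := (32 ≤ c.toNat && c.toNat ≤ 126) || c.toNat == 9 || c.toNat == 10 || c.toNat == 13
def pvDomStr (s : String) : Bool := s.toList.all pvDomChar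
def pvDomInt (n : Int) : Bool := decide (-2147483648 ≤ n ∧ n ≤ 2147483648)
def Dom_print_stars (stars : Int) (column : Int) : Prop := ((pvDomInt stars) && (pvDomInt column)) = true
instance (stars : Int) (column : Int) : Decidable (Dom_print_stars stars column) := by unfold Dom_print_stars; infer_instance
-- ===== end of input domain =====

-- B replaces A's per-star loop (counter + modulo newline test) by a closed-form
-- chunked construction: full rows via // and %, built with string repetition.

-- ===== PORT A =====
-- the while loop: counter/result state, newline appended after every `column`-th star
def printStarsLoop (stars column : Int) (counter : Int) (result : List Char) : List Char :=
  if h : counter < stars then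
    let c := counter + 1
    let r := result ++ ['*']
    let r2 := if PySem.Int.mod c column = 0 then r ++ ['\n'] else r
    printStarsLoop stars column c r2
  else result
termination_by (stars - counter).toNat
decreasing_by omega

def print_stars (stars : Int) (column : Int) : String :=
  if column ≤ 0 ∨ stars ≤ 0 then "Please input number > 0"
  else String.mk (printStarsLoop stars column 0 [])

-- ===== PORT B =====
-- hand port of Python's `s * n` on strings (as lists of chars); exact: n ≤ 0 gives ''
def repList (xs : List Char) (n : Int) : List Char :=
  List.flatten (List.replicate n.toNat xs)

def print_stars_alt (stars : Int) (column : Int) : String :=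
  if column ≤ 0 ∨ stars ≤ 0 then "Please input number > 0"
  else
    let full := PySem.Int.floordiv stars column
    let rem := PySem.Int.mod stars column
    -- min keeps the row no longer than the output itself, as in Source B
    String.mk (repList (repList ['*'] (min column stars) ++ ['\n']) full ++ repList ['*'] rem)

-- ===== PRECONDITION & SPEC =====
def Spec_print_stars (stars : Int) (column : Int) (out : String) : Prop := out = print_stars_alt stars column
instance (stars : Int) (column : Int) (out : String) : Decidable (Spec_print_stars stars column out) := by unfold Spec_print_stars; infer_instance

-- ===== CLAIM (what is proved, stated in full; the proofs are below) =====
def Claim_equal_print_stars : Prop := ∀ (stars : Int) (column : Int), Dom_print_stars stars column → Spec_print_stars stars column (print_stars stars column)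

-- ===== LEMMAS AND PROOFS =====

-- B's body for `k` stars, as a function of k (the loop invariant's shape)
def chunkB (column k : Int) : List Char :=
  repList (repList ['*'] column ++ ['\n']) (PySem.Int.floordiv k column) ++ repList ['*'] (PySem.Int.mod k column)

theorem floordiv_eq_ediv (a b : Int) (hb : 0 < b) : PySem.Int.floordiv a b = a / b := by
  simp [PySem.Int.floordiv]
  exact Int.fdiv_eq_ediv_of_nonneg a (le_of_lt hb)

theorem mod_eq_emod (a b : Int) (hb : 0 < b) : PySem.Int.mod a b = a % b := by
  simp [PySem.Int.mod, Int.fmod_eq_emod, Or.inl (le_of_lt hb)]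

theorem divmod_unique (a b q r : Int) (hb : 0 < b) (h : a = r + b * q) (h0 : 0 ≤ r) (hr : r < b) :
    a / b = q ∧ a % b = r := by
  have h1 : a / b = q := by
    rw [h, Int.add_mul_ediv_left _ _ (ne_of_gt hb), Int.ediv_eq_zero_of_lt h0 hr, zero_add]
  have h2 : a % b = r := by
    have h3 := Int.mul_ediv_add_emod a b
    rw [h1] at h3
    omega
  exact ⟨h1, h2⟩

theorem chunkB_step (column k : Int) (hc : 0 < column) (hk : 0 ≤ k) :
    chunkB column (k + 1) =
      if PySem.Int.mod (k + 1) column = 0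
      then (chunkB column k ++ ['*']) ++ ['\n']
      else chunkB column k ++ ['*'] := by
  obtain ⟨q, hqdef⟩ : ∃ q, k / column = q := ⟨_, rfl⟩
  obtain ⟨r, hrdef⟩ : ∃ r, k % column = r := ⟨_, rfl⟩
  have hq0 : 0 ≤ q := hqdef ▸ Int.ediv_nonneg hk (le_of_lt hc)
  have hr0 : 0 ≤ r := hrdef ▸ Int.emod_nonneg k (ne_of_gt hc)
  have hrlt : r < column := hrdef ▸ Int.emod_lt_of_pos k hc
  have hdm : column * q + r = k := by
    rw [← hqdef, ← hrdef]; exact Int.mul_ediv_add_emod k column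
  by_cases h : r + 1 = column
  · -- the (k+1)-th star completes a row
    have hmc : column * (q + 1) = column * q + column := by ring
    obtain ⟨hdiv, hmod⟩ := divmod_unique (k + 1) column (q + 1) 0 hc (by omega) le_rfl hc
    simp only [chunkB, mod_eq_emod _ _ hc, floordiv_eq_ediv _ _ hc, hqdef, hrdef, hdiv, hmod]
    have htn : (q + 1).toNat = q.toNat + 1 := by omega
    have hcn : column.toNat = r.toNat + 1 := by omega
    simp [repList, htn, hcn, List.replicate_succ' (n := q.toNat), List.replicate_succ' (n := r.toNat)]
  · -- row not complete: quotient unchanged, remainder grows by one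
    obtain ⟨hdiv, hmod⟩ := divmod_unique (k + 1) column q (r + 1) hc (by omega) (by omega) (by omega)
    have hne : ¬ (r + 1 = 0) := by omega
    simp only [chunkB, mod_eq_emod _ _ hc, floordiv_eq_ediv _ _ hc, hqdef, hrdef, hdiv, hmod,
      if_neg hne]
    have hrn : (r + 1).toNat = r.toNat + 1 := by omega
    simp [repList, hrn, List.replicate_succ' (n := r.toNat)]

theorem chunkB_zero (column : Int) : chunkB column 0 = [] := by
  simp [chunkB, repList, PySem.Int.floordiv, PySem.Int.mod, Int.zero_fdiv, Int.zero_fmod]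

theorem loop_eq (stars column : Int) (hc : 0 < column) :
    ∀ (n : Nat) (counter : Int), 0 ≤ counter → counter ≤ stars → (stars - counter).toNat = n →
      printStarsLoop stars column counter (chunkB column counter) = chunkB column stars := by
  intro n
  induction n with
  | zero =>
    intro counter h0 hle hn
    have : counter = stars := by omega
    subst this
    rw [printStarsLoop]
    simp
  | succ m ih =>
    intro counter h0 hle hn
    have hlt : counter < stars := by omega
    rw [printStarsLoop, dif_pos hlt]
    have hstep := chunkB_step column counter hc h0
    by_cases hm : PySem.Int.mod (counter + 1) column = 0
    · simp only [if_pos hm] at hstep ⊢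
      rw [← hstep]
      exact ih (counter + 1) (by omega) (by omega) (by omega)
    · simp only [if_neg hm] at hstep ⊢
      rw [← hstep]
      exact ih (counter + 1) (by omega) (by omega) (by omega)

-- ===== VERDICT (by name: the statement is the Claim_ definition above) =====
theorem print_stars_spec : Claim_equal_print_stars := by
  intro stars column _
  unfold Spec_print_stars print_stars print_stars_alt
  by_cases hg : column ≤ 0 ∨ stars ≤ 0
  · simp [hg]
  · have hc : 0 < column := by omega
    simp only [if_neg hg]
    have hs : 0 < stars := by omega
    have h := loop_eq stars column hc (stars - 0).toNat 0 (by omega) (by omega) rfl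
    rw [chunkB_zero] at h
    rw [h]
    -- B's body equals chunkB column stars (the `min` matters only when there is no full row)
    simp only [chunkB]
    by_cases hcs : column ≤ stars
    · rw [min_eq_left hcs]
    · have hz : PySem.Int.floordiv stars column = 0 := by
        rw [floordiv_eq_ediv _ _ hc]
        exact Int.ediv_eq_zero_of_lt (by omega) (by omega)
      rw [hz]
      simp [repList]
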